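-- pv_equiv track=rewrite | github.com/gwcbi/haphpipe | haphpipe/utils/blastalign.py | called_regions
-- ===== SOURCE A (Python) =====
-- def called_regions(alnseg):
--     called = []
--     flag = False
--     for tup in alnseg:
--         if flag:
--             if tup[2] == '*':
--                 called[-1]['end'] = tup
--                 flag = False
--         else:
--             if tup[2] != '*':
--                 called.append({'start': tup, 'end': None})
--                 flag = True
--     if flag:
--         assert called[-1]['end'] is None
--         called[-1]['end'] = tup
--
--     return [(d['start'][3]+1, d['end'][3]) for d in called]
-- ===== SOURCE B (Python) =====
-- def called_regions(alnseg):
--     # Phase 1: group the alignment into maximal runs of equal gap-ness (tup[2] == '*').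
--     runs = []
--     cur = None
--     cur_gap = None
--     for tup in alnseg:
--         gap = (tup[2] == '*')
--         if cur is not None and gap == cur_gap:
--             cur.append(tup)
--         else:
--             if cur is not None:
--                 runs.append((cur_gap, cur))
--             cur, cur_gap = [tup], gap
--     if cur is not None:
--         runs.append((cur_gap, cur))
--     # Phase 2: each non-gap run yields a region; its end is the first tuple of the
--     # following (gap) run, or the run's own last tuple when it reaches the input's end.
--     out = []
--     for idx, (gap, members) in enumerate(runs):
--         if not gap:
--             end = runs[idx + 1][1][0] if idx + 1 < len(runs) else members[-1]
--             out.append((members[0][3] + 1, end[3]))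
--     return out
-- ===== Notes on version B (the rewrite author's own statement) =====
-- stated objective: alternative
-- what changed: Replaces A's single-pass flag automaton that mutates the last appended record with a two-phase algorithm: first group the alignment into maximal runs of equal gap-ness, then emit one region per non-gap run, taking its end from the first member of the following run or the run's own last member.
import Mathlib
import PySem

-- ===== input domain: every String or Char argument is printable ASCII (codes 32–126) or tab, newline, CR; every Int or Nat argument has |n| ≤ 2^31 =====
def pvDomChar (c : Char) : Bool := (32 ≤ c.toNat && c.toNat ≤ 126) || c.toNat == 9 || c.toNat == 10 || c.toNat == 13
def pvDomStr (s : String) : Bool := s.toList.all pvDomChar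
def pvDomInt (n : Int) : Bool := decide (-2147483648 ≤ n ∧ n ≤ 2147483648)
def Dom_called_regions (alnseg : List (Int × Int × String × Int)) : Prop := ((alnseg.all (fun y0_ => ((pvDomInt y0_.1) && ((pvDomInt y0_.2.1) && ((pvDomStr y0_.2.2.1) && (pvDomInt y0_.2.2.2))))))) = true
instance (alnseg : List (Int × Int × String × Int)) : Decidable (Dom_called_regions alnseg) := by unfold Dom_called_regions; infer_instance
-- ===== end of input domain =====

-- B replaces A's flag automaton (which mutates the last appended record) by a two-phase
-- group-into-runs-then-emit decomposition; same cost, different structure (objective: alternative).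

abbrev PvTup : Type := Int × Int × String × Int

def pvGap (t : PvTup) : Bool := t.2.2.1 == "*"

-- ===== PORT A =====
-- called[-1]['end'] = tup : rewrite the 'end' field of the last list entry
def pvSetLastEnd (l : List (PvTup × Option PvTup)) (t : PvTup) : List (PvTup × Option PvTup) :=
  match l with
  | [] => []
  | [x] => [(x.1, some t)]
  | x :: y :: xs => x :: pvSetLastEnd (y :: xs) t

-- one iteration of A's loop; state = (called, flag, last tup seen)
def pvStepA (st : List (PvTup × Option PvTup) × Bool × Option PvTup) (t : PvTup) :
    List (PvTup × Option PvTup) × Bool × Option PvTup :=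
  match st with
  | (called, flag, _) =>
    if flag then
      if pvGap t then (pvSetLastEnd called t, false, some t) else (called, true, some t)
    else
      if !(pvGap t) then (called ++ [(t, none)], true, some t) else (called, false, some t)

-- d['end'][3]; the 'none' branch is unreachable (by the time A builds its result every 'end'
-- has been set), so Python never raises here
def pvEndVal (e : Option PvTup) : Int :=
  match e with
  | some e => e.2.2.2
  | none => 0

def pvF (d : PvTup × Option PvTup) : Int × Int := (d.1.2.2.2 + 1, pvEndVal d.2)

-- A's post-loop fix-up ('if flag: called[-1]["end"] = tup') and final comprehension
def pvFinA (st : List (PvTup × Option PvTup) × Bool × Option PvTup) : List (Int × Int) :=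
  let called :=
    if st.2.1 then
      match st.2.2 with
      | some t => pvSetLastEnd st.1 t
      | none => st.1
    else st.1
  called.map pvF

def called_regions (alnseg : List (Int × Int × String × Int)) : List (Int × Int) :=
  pvFinA (alnseg.foldl pvStepA ([], false, none))

-- ===== PORT B =====
def pvDummy : PvTup := (0, 0, "", 0)

-- one iteration of B's grouping loop; state = (runs, current run as (cur_gap, cur) if any)
def pvStepB (st : List (Bool × List PvTup) × Option (Bool × List PvTup)) (t : PvTup) :
    List (Bool × List PvTup) × Option (Bool × List PvTup) :=
  let g := pvGap t
  match st with
  | (runs, some (cg, cur)) =>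
    if g == cg then (runs, some (cg, cur ++ [t]))
    else (runs ++ [(cg, cur)], some (g, [t]))
  | (runs, none) => (runs, some (g, [t]))

-- B's emitting loop: end = first member of the next run if it exists, else own last member
def pvEmit : List (Bool × List PvTup) → List (Int × Int)
  | [] => []
  | (g, ms) :: rest =>
    if g then pvEmit rest
    else
      let endt :=
        match rest with
        | (_, ms') :: _ => ms'.headD pvDummy
        | [] => ms.getLastD pvDummy
      ((ms.headD pvDummy).2.2.2 + 1, endt.2.2.2) :: pvEmit rest

def called_regions_alt (alnseg : List (Int × Int × String × Int)) : List (Int × Int) :=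
  let st := alnseg.foldl pvStepB ([], none)
  let runs := match st.2 with
    | some c => st.1 ++ [c]
    | none => st.1
  pvEmit runs

-- ===== PRECONDITION & SPEC =====
def Spec_called_regions (alnseg : List (Int × Int × String × Int)) (out : List (Int × Int)) : Prop := out = called_regions_alt alnseg
instance (alnseg : List (Int × Int × String × Int)) (out : List (Int × Int)) : Decidable (Spec_called_regions alnseg out) := by unfold Spec_called_regions; infer_instance

-- ===== CLAIM (what is proved, stated in full; the proofs are below) =====
def Claim_equal_called_regions : Prop := ∀ (alnseg : List (Int × Int × String × Int)), Dom_called_regions alnseg → Spec_called_regions alnseg (called_regions alnseg)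

-- ===== LEMMAS AND PROOFS =====

-- common reference function: S = scanning outside a region, R s la = inside a region
-- started at s with la the last tuple seen
mutual
def pvS : List PvTup → List (Int × Int)
  | [] => []
  | t :: ts => if pvGap t then pvS ts else pvR t t ts
def pvR (s la : PvTup) : List PvTup → List (Int × Int)
  | [] => [(s.2.2.2 + 1, la.2.2.2)]
  | t :: ts => if pvGap t then (s.2.2.2 + 1, t.2.2.2) :: pvS ts else pvR s t ts
end

-- the runs of a list, by maximal-prefix recursion
def pvRunsOf : List PvTup → List (Bool × List PvTup)
  | [] => []
  | t :: ts =>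
    (pvGap t, t :: ts.takeWhile (fun u => pvGap u == pvGap t)) ::
      pvRunsOf (ts.dropWhile (fun u => pvGap u == pvGap t))
termination_by l => l.length
decreasing_by
  simpa using Nat.lt_succ_of_le (List.length_dropWhile_le _ _)

def pvConsRun (g : Bool) (t : PvTup) : List (Bool × List PvTup) → List (Bool × List PvTup)
  | [] => [(g, [t])]
  | (g', ms) :: rest => if g' == g then (g, t :: ms) :: rest else (g, [t]) :: (g', ms) :: rest

def pvMergeFirst (cg : Bool) (cur : List PvTup) : List (Bool × List PvTup) → List (Bool × List PvTup)
  | [] => [(cg, cur)]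
  | (g', ms) :: rest => if g' == cg then (cg, cur ++ ms) :: rest else (cg, cur) :: (g', ms) :: rest

def pvFinB (st : List (Bool × List PvTup) × Option (Bool × List PvTup)) : List (Bool × List PvTup) :=
  match st.2 with
  | some c => st.1 ++ [c]
  | none => st.1

theorem pvRunsOf_cons (t : PvTup) (ts : List PvTup) :
    pvRunsOf (t :: ts) = pvConsRun (pvGap t) t (pvRunsOf ts) := by
  cases ts with
  | nil => simp [pvRunsOf, pvConsRun]
  | cons u us =>
    by_cases h : pvGap u = pvGap t
    · rw [pvRunsOf, pvRunsOf]
      simp [pvConsRun, h, List.takeWhile, List.dropWhile]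
    · have hb : (pvGap u == pvGap t) = false := by simp [h]
      rw [pvRunsOf, pvRunsOf]
      simp [pvConsRun, hb, List.takeWhile, List.dropWhile]
      rw [pvRunsOf]

theorem pvConsRun_eq_mergeFirst (g : Bool) (t : PvTup) (rs : List (Bool × List PvTup)) :
    pvConsRun g t rs = pvMergeFirst g [t] rs := by
  cases rs with
  | nil => rfl
  | cons hd tl => cases hd with | mk g' ms => simp [pvConsRun, pvMergeFirst]

theorem pvMergeFirst_consRun_same (cg : Bool) (cur : List PvTup) (t : PvTup)
    (rs : List (Bool × List PvTup)) :
    pvMergeFirst cg cur (pvConsRun cg t rs) = pvMergeFirst cg (cur ++ [t]) rs := by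
  cases rs with
  | nil => simp [pvConsRun, pvMergeFirst]
  | cons hd tl =>
    cases hd with
    | mk g' ms =>
      by_cases h : g' = cg
      · simp [pvConsRun, pvMergeFirst, h]
      · simp [pvConsRun, pvMergeFirst, h]

theorem pvMergeFirst_consRun_ne (cg g : Bool) (cur : List PvTup) (t : PvTup)
    (rs : List (Bool × List PvTup)) (h : g ≠ cg) :
    pvMergeFirst cg cur (pvConsRun g t rs) = (cg, cur) :: pvConsRun g t rs := by
  cases rs with
  | nil => simp [pvConsRun, pvMergeFirst, h]
  | cons hd tl =>
    cases hd with
    | mk g' ms =>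
      by_cases h' : g' = g
      · simp [pvConsRun, pvMergeFirst, h, h']
      · simp [pvConsRun, pvMergeFirst, h, h']

theorem pvFoldB_some (l : List PvTup) : ∀ (runs : List (Bool × List PvTup)) (cg : Bool)
    (cur : List PvTup),
    pvFinB (l.foldl pvStepB (runs, some (cg, cur))) = runs ++ pvMergeFirst cg cur (pvRunsOf l) := by
  induction l with
  | nil => intro runs cg cur; simp [pvFinB, pvRunsOf, pvMergeFirst]
  | cons t ts ih =>
    intro runs cg cur
    rw [pvRunsOf_cons]
    by_cases h : pvGap t = cg
    · have hstep : pvStepB (runs, some (cg, cur)) t = (runs, some (cg, cur ++ [t])) := by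
        simp [pvStepB, h]
      rw [List.foldl_cons, hstep, ih, h, pvMergeFirst_consRun_same]
    · have hstep : pvStepB (runs, some (cg, cur)) t = (runs ++ [(cg, cur)], some (pvGap t, [t])) := by
        simp [pvStepB, h]
      rw [List.foldl_cons, hstep, ih, pvMergeFirst_consRun_ne cg (pvGap t) cur t _ h,
        pvConsRun_eq_mergeFirst]
      simp

theorem pvAlt_eq_emit_runsOf (l : List PvTup) :
    called_regions_alt l = pvEmit (pvRunsOf l) := by
  cases l with
  | nil => simp [called_regions_alt, pvRunsOf, pvEmit]
  | cons t ts =>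
    show pvEmit (pvFinB ((t :: ts).foldl pvStepB ([], none))) = _
    have hstep : pvStepB ([], none) t = ([], some (pvGap t, [t])) := rfl
    rw [List.foldl_cons, hstep, pvFoldB_some, pvRunsOf_cons, pvConsRun_eq_mergeFirst]
    simp

theorem pvS_dropGaps (ts : List PvTup) :
    pvS (ts.dropWhile (fun u => pvGap u == true)) = pvS ts := by
  induction ts with
  | nil => rfl
  | cons u us ih =>
    by_cases h : pvGap u = true
    · rw [List.dropWhile_cons_of_pos (by simp [h]), ih, pvS]
      simp [h]
    · rw [List.dropWhile_cons_of_neg (by simp [h])]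

theorem pvR_append (a : List PvTup) : ∀ (b : List PvTup) (s la : PvTup),
    (∀ u ∈ a, pvGap u = false) → pvR s la (a ++ b) = pvR s (a.getLastD la) b := by
  induction a with
  | nil => intro b s la _; rfl
  | cons u us ih =>
    intro b s la h
    rw [List.cons_append, pvR]
    simp only [h u (by simp), List.getLastD_cons]
    exact ih b s u (fun v hv => h v (by simp [hv]))

theorem pvEmit_false_cons (ms : List PvTup) (g2 : Bool) (ms2 : List PvTup)
    (rest : List (Bool × List PvTup)) :
    pvEmit ((false, ms) :: (g2, ms2) :: rest) =
      ((ms.headD pvDummy).2.2.2 + 1, (ms2.headD pvDummy).2.2.2) :: pvEmit ((g2, ms2) :: rest) := by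
  simp [pvEmit]

theorem pvEmit_runsOf_aux (n : Nat) : ∀ (l : List PvTup), l.length ≤ n →
    pvEmit (pvRunsOf l) = pvS l := by
  induction n with
  | zero =>
    intro l hl
    have : l = [] := List.eq_nil_of_length_eq_zero (Nat.le_zero.mp hl)
    subst this; simp [pvRunsOf, pvEmit, pvS]
  | succ m ih =>
    intro l hl
    cases l with
    | nil => simp [pvRunsOf, pvEmit, pvS]
    | cons t ts =>
      have hts : ts.length ≤ m := by simpa using hl
      rw [pvRunsOf]
      by_cases hg : pvGap t = true
      · simp only [pvEmit, hg, if_true]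
        rw [ih _ (le_trans (List.length_dropWhile_le _ _) hts), pvS_dropGaps]
        conv_rhs => rw [pvS]
        simp [hg]
      · have hg' : pvGap t = false := by simpa using hg
        simp only [hg']
        have hS : pvS (t :: ts) = pvR t
            ((ts.takeWhile (fun u => pvGap u == false)).getLastD t)
            (ts.dropWhile (fun u => pvGap u == false)) := by
          rw [pvS]
          simp only [hg', Bool.false_eq_true, if_false]
          conv_lhs => rw [← List.takeWhile_append_dropWhile
            (p := fun u => pvGap u == false) (l := ts)]
          rw [pvR_append]
          intro u hu
          simpa using List.mem_takeWhile_imp hu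
        rw [hS]
        cases hb : ts.dropWhile (fun u => pvGap u == false) with
        | nil => simp [pvRunsOf, pvEmit, pvR, List.getLast?_cons]
        | cons u bs =>
          have hu : pvGap u = true := by
            have h2 := List.head?_dropWhile_not (fun u => pvGap u == false) ts
            rw [hb] at h2
            simpa using h2
          have hlen : (u :: bs).length ≤ m := by
            have := List.length_dropWhile_le (fun u => pvGap u == false) ts
            rw [hb] at this
            exact le_trans this hts
          have humain : pvRunsOf (u :: bs) = (pvGap u,
              u :: bs.takeWhile (fun v => pvGap v == pvGap u)) ::
              pvRunsOf (bs.dropWhile (fun v => pvGap v == pvGap u)) := by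
            rw [pvRunsOf]
          rw [humain, pvEmit_false_cons, ← humain, ih _ hlen]
          rw [pvR, pvS]
          simp [hu]

theorem pvEmit_runsOf (l : List PvTup) : pvEmit (pvRunsOf l) = pvS l :=
  pvEmit_runsOf_aux l.length l le_rfl

theorem pvSetLastEnd_append (done : List (PvTup × Option PvTup)) (s : PvTup) (e : Option PvTup)
    (t : PvTup) : pvSetLastEnd (done ++ [(s, e)]) t = done ++ [(s, some t)] := by
  induction done with
  | nil => rfl
  | cons x xs ih =>
    cases hx : xs ++ [(s, e)] with
    | nil => simp at hx
    | cons y ys =>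
      rw [List.cons_append, hx, pvSetLastEnd, ← hx, ih]
      simp

theorem pvFoldA (l : List PvTup) :
    (∀ (called : List (PvTup × Option PvTup)) (la : Option PvTup),
      pvFinA (l.foldl pvStepA (called, false, la)) = called.map pvF ++ pvS l) ∧
    (∀ (done : List (PvTup × Option PvTup)) (s lt : PvTup),
      pvFinA (l.foldl pvStepA (done ++ [(s, none)], true, some lt)) = done.map pvF ++ pvR s lt l) := by
  induction l with
  | nil =>
    constructor
    · intro called la
      simp [pvFinA, pvS]
    · intro done s lt
      show pvFinA (done ++ [(s, none)], true, some lt) = _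
      rw [pvR]
      simp [pvFinA, pvSetLastEnd_append, pvF, pvEndVal]
  | cons t ts ih =>
    obtain ⟨ih1, ih2⟩ := ih
    constructor
    · intro called la
      rw [List.foldl_cons]
      by_cases h : pvGap t = true
      · have hstep : pvStepA (called, false, la) t = (called, false, some t) := by
          simp [pvStepA, h]
        rw [hstep, ih1]
        conv_rhs => rw [pvS]
        simp [h]
      · have hstep : pvStepA (called, false, la) t = (called ++ [(t, none)], true, some t) := by
          simp [pvStepA, h]
        rw [hstep, ih2]
        conv_rhs => rw [pvS]
        simp [h]
    · intro done s lt
      rw [List.foldl_cons]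
      by_cases h : pvGap t = true
      · have hstep : pvStepA (done ++ [(s, none)], true, some lt) t =
            (pvSetLastEnd (done ++ [(s, none)]) t, false, some t) := by
          simp [pvStepA, h]
        rw [hstep, pvSetLastEnd_append, ih1]
        conv_rhs => rw [pvR]
        simp [h, pvF, pvEndVal]
      · have hstep : pvStepA (done ++ [(s, none)], true, some lt) t =
            (done ++ [(s, none)], true, some t) := by
          simp [pvStepA, h]
        rw [hstep, ih2]
        conv_rhs => rw [pvR]
        simp [h]

-- ===== VERDICT (by name: the statement is the Claim_ definition above) =====
theorem called_regions_spec : Claim_equal_called_regions := by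
  intro alnseg _
  show called_regions alnseg = called_regions_alt alnseg
  have hA : called_regions alnseg = pvS alnseg := by
    simpa using (pvFoldA alnseg).1 [] none
  rw [hA, pvAlt_eq_emit_runsOf, pvEmit_runsOf]
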